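-- pv_equiv track=rewrite | github.com/solomonczyk/individual-sports-nutrition | ai-service/app/ml/meal_planner.py | ensure_meal_diversity
-- ===== SOURCE A (Python) =====
-- from typing import Dict, List, Optional
--
-- def ensure_meal_diversity(
--     selected_meals: List[Dict],
--     available_meals: List[Dict],
--     max_repeats: int = 1,
-- ) -> List[Dict]:
--     """
--     Ensure meal diversity by avoiding too many repeats
--
--     Args:
--         selected_meals: Already selected meals
--         available_meals: Pool of available meals
--         max_repeats: Maximum number of times a meal can be repeated
--
--     Returns:
--         Diversified list of meals
--     """
--     if not selected_meals:
--         return available_meals[:len(available_meals)]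
--
--     # Count meal occurrences
--     meal_counts = {}
--     for meal in selected_meals:
--         meal_id = meal.get("id") or meal.get("name_key", "")
--         meal_counts[meal_id] = meal_counts.get(meal_id, 0) + 1
--
--     # Separate meals that haven't been used too much
--     available = []
--     overused = []
--
--     for meal in available_meals:
--         meal_id = meal.get("id") or meal.get("name_key", "")
--         count = meal_counts.get(meal_id, 0)
--
--         if count < max_repeats:
--             available.append(meal)
--         else:
--             overused.append(meal)
--
--     # Prioritize unused meals, then less used ones
--     # This ensures diversity
--     result = available + overused
--
--     return result
-- ===== SOURCE B (Python) =====
-- from typing import Dict, List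
--
-- def ensure_meal_diversity(
--     selected_meals: List[Dict],
--     available_meals: List[Dict],
--     max_repeats: int = 1,
-- ) -> List[Dict]:
--     meal_counts = {}
--     for meal in selected_meals:
--         meal_id = meal.get("id") or meal.get("name_key", "")
--         meal_counts[meal_id] = meal_counts.get(meal_id, 0) + 1
--     return sorted(
--         available_meals,
--         key=lambda m: meal_counts.get(m.get("id") or m.get("name_key", ""), 0) >= max_repeats,
--     )
-- ===== Notes on version B (the rewrite author's own statement) =====
-- stated objective: simpler
-- what changed: Replaces A's empty-guard plus two-accumulator partition loop with a single stable sort of available_meals on the boolean key 'count >= max_repeats' (False before True), which yields the identical ordering including the empty selected_meals case.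
import Mathlib
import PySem

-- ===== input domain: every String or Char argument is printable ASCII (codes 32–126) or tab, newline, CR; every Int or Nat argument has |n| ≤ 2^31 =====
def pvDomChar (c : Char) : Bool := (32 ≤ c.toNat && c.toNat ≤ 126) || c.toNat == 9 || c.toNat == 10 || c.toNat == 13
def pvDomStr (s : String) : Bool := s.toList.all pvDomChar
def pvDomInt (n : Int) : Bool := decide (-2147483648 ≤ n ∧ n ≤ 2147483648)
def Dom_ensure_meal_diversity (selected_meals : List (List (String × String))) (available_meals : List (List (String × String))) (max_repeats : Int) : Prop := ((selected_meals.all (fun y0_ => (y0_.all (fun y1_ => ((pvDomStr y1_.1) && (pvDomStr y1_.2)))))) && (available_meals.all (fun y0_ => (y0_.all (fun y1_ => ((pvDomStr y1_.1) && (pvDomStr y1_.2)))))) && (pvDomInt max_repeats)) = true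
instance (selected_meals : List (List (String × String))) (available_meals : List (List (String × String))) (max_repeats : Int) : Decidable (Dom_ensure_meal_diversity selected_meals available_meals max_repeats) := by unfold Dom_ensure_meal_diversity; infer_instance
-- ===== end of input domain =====

-- B replaces A's two-bucket partition loop by one stable sort on the boolean key
-- "usage count ≥ max_repeats" (objective: simpler — the guard and the two accumulators disappear).

-- ===== PORT A =====

-- meal.get("id") or meal.get("name_key", "")  (Python truthiness: None and "" fall through)
def pvMealId (meal : List (String × String)) : String :=
  match PySem.Dict.get? (PySem.Dict.mk meal) "id" with
  | some s => if s = "" then PySem.Dict.getD (PySem.Dict.mk meal) "name_key" "" else s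
  | none => PySem.Dict.getD (PySem.Dict.mk meal) "name_key" ""

-- the meal_counts loop (identical statement in A and in B)
def pvMealCounts (selected_meals : List (List (String × String))) : PySem.Dict String Int :=
  selected_meals.foldl
    (fun d meal =>
      let meal_id := pvMealId meal
      PySem.Dict.insert d meal_id (PySem.Dict.getD d meal_id 0 + 1)) PySem.Dict.empty

def ensure_meal_diversity (selected_meals : List (List (String × String))) (available_meals : List (List (String × String))) (max_repeats : Int) : List (List (String × String)) :=
  if selected_meals = [] then
    PySem.List.slice available_meals none (some (available_meals.length : Int))
  else
    let meal_counts := pvMealCounts selected_meals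
    let p := available_meals.foldl
      (fun (acc : List (List (String × String)) × List (List (String × String))) meal =>
        let count := PySem.Dict.getD meal_counts (pvMealId meal) 0
        if count < max_repeats then (acc.1 ++ [meal], acc.2) else (acc.1, acc.2 ++ [meal]))
      ([], [])
    p.1 ++ p.2

-- ===== PORT B =====
def ensure_meal_diversity_alt (selected_meals : List (List (String × String))) (available_meals : List (List (String × String))) (max_repeats : Int) : List (List (String × String)) :=
  let meal_counts := pvMealCounts selected_meals
  PySem.List.sorted available_meals
    (fun m => decide (max_repeats ≤ PySem.Dict.getD meal_counts (pvMealId m) 0)) false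

-- ===== PRECONDITION & SPEC =====
def Spec_ensure_meal_diversity (selected_meals : List (List (String × String))) (available_meals : List (List (String × String))) (max_repeats : Int) (out : List (List (String × String))) : Prop := out = ensure_meal_diversity_alt selected_meals available_meals max_repeats
instance (selected_meals : List (List (String × String))) (available_meals : List (List (String × String))) (max_repeats : Int) (out : List (List (String × String))) : Decidable (Spec_ensure_meal_diversity selected_meals available_meals max_repeats out) := by unfold Spec_ensure_meal_diversity; infer_instance

-- ===== CLAIM (what is proved, stated in full; the proofs are below) =====
def Claim_equal_ensure_meal_diversity : Prop := ∀ (selected_meals : List (List (String × String))) (available_meals : List (List (String × String))) (max_repeats : Int), Dom_ensure_meal_diversity selected_meals available_meals max_repeats → Spec_ensure_meal_diversity selected_meals available_meals max_repeats (ensure_meal_diversity selected_meals available_meals max_repeats)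

-- ===== LEMMAS AND PROOFS =====

-- inserting x into all-false ++ all-true places it between the groups
theorem insertBy_bool_middle {α : Type} (before : α → α → Bool) (x : α)
    (fs ts : List α) (hfs : ∀ y ∈ fs, before x y = false)
    (hts : ∀ y ∈ ts, before x y = true) :
    PySem.List.insertBy before x (fs ++ ts) = fs ++ x :: ts := by
  induction fs with
  | nil =>
    cases ts with
    | nil => rfl
    | cons t ts' => simp [PySem.List.insertBy, hts t (by simp)]
  | cons f fs' ih =>
    simp only [List.cons_append, PySem.List.insertBy,
      hfs f (by simp)]
    simp [ih (fun y hy => hfs y (by simp [hy]))]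

-- invariant of B's insertion fold with a boolean key
theorem foldl_insertBy_bool {α : Type} (key : α → Bool) (xs fs ts : List α)
    (hfs : ∀ y ∈ fs, key y = false) (hts : ∀ y ∈ ts, key y = true) :
    xs.foldl (fun acc x => PySem.List.insertBy (fun a b => decide (key a < key b)) x acc) (fs ++ ts)
      = (fs ++ xs.filter (fun x => !key x)) ++ (ts ++ xs.filter key) := by
  induction xs generalizing fs ts with
  | nil => simp
  | cons x xs ih =>
    simp only [List.foldl_cons]
    by_cases hx : key x = true
    · have hstep : PySem.List.insertBy (fun a b => decide (key a < key b)) x (fs ++ ts)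
          = (fs ++ ts) ++ [x] := by
        apply PySem.List.insertBy_of_forall_not_before
        intro y _; simp [hx]
      rw [hstep, List.append_assoc]
      rw [ih fs (ts ++ [x]) hfs (by intro y hy; rcases List.mem_append.1 hy with h | h
                                    · exact hts y h
                                    · simp at h; simpa [h])]
      simp [hx]
    · simp only [Bool.not_eq_true] at hx
      have hstep : PySem.List.insertBy (fun a b => decide (key a < key b)) x (fs ++ ts)
          = fs ++ x :: ts := by
        apply insertBy_bool_middle
        · intro y hy; simp [hx, hfs y hy]
        · intro y hy; simp [hx, hts y hy]
      rw [hstep, show fs ++ x :: ts = (fs ++ [x]) ++ ts by simp]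
      rw [ih (fs ++ [x]) ts (by intro y hy; rcases List.mem_append.1 hy with h | h
                                · exact hfs y h
                                · simp at h; simpa [h]) hts]
      simp [hx]

-- a stable sort on a boolean key is the stable two-way partition
theorem sorted_bool_eq_partition {α : Type} (key : α → Bool) (xs : List α) :
    PySem.List.sorted xs key false = xs.filter (fun x => !key x) ++ xs.filter key := by
  rw [PySem.List.sorted_eq_foldl_insertBy]
  simpa using foldl_insertBy_bool key xs [] [] (by simp) (by simp)

-- A's accumulator-pair loop is the same two-way partition
theorem foldl_pair_partition {α : Type} (P : α → Prop) [DecidablePred P] (xs fs ts : List α) :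
    xs.foldl (fun (acc : List α × List α) x =>
        if P x then (acc.1 ++ [x], acc.2) else (acc.1, acc.2 ++ [x])) (fs, ts)
      = (fs ++ xs.filter (fun x => decide (P x)), ts ++ xs.filter (fun x => !decide (P x))) := by
  induction xs generalizing fs ts with
  | nil => simp
  | cons x xs ih =>
    by_cases hx : P x
    · simp [hx, ih]
    · simp [hx, ih]

-- ===== VERDICT (by name: the statement is the Claim_ definition above) =====
theorem ensure_meal_diversity_spec : Claim_equal_ensure_meal_diversity := by
  intro sel avail mr _
  show ensure_meal_diversity sel avail mr = ensure_meal_diversity_alt sel avail mr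
  unfold ensure_meal_diversity ensure_meal_diversity_alt
  rw [sorted_bool_eq_partition]
  by_cases hsel : sel = []
  · simp only [hsel]
    have hslice : PySem.List.slice avail none (some (avail.length : Int)) = avail := by
      simp [pysem]
    rw [hslice]
    have hc : pvMealCounts ([] : List (List (String × String))) = PySem.Dict.empty := rfl
    by_cases hmr : mr ≤ 0
    · have hk : ∀ m : List (String × String),
          (decide (mr ≤ PySem.Dict.getD (pvMealCounts ([] : List (List (String × String)))) (pvMealId m) 0)) = true := by
        intro m; simp [hc, PySem.Dict.getD, PySem.Dict.empty, PySem.Dict.get?, hmr]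
      rw [List.filter_eq_nil_iff.2 (fun a _ => by simp [hk a]),
          List.filter_eq_self.2 (fun a _ => hk a)]
      simp
    · have hk : ∀ m : List (String × String),
          (decide (mr ≤ PySem.Dict.getD (pvMealCounts ([] : List (List (String × String)))) (pvMealId m) 0)) = false := by
        intro m; simp [hc, PySem.Dict.getD, PySem.Dict.empty, PySem.Dict.get?]; omega
      rw [List.filter_eq_self.2 (fun a _ => by simp [hk a]),
          List.filter_eq_nil_iff.2 (fun a _ => by simp [hk a])]
      simp
  · simp only [if_neg hsel]
    show (avail.foldl
        (fun (acc : List (List (String × String)) × List (List (String × String))) meal =>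
          if PySem.Dict.getD (pvMealCounts sel) (pvMealId meal) 0 < mr then
            (acc.1 ++ [meal], acc.2) else (acc.1, acc.2 ++ [meal])) ([], [])).1
      ++ (avail.foldl
        (fun (acc : List (List (String × String)) × List (List (String × String))) meal =>
          if PySem.Dict.getD (pvMealCounts sel) (pvMealId meal) 0 < mr then
            (acc.1 ++ [meal], acc.2) else (acc.1, acc.2 ++ [meal])) ([], [])).2 = _
    rw [foldl_pair_partition (fun m => PySem.Dict.getD (pvMealCounts sel) (pvMealId m) 0 < mr) avail [] []]
    simp only [List.nil_append]
    congr 1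
    · apply List.filter_congr; intro m _; simp [← decide_not, not_le]
    · apply List.filter_congr; intro m _; simp [← decide_not, not_lt]
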